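-- pv_equiv track=rewrite | github.com/PeterCaine/VU_Thesis_Aspect_Extraction_Category_Detection | Aspect_Category_Detection/Kiritchenko_system/utils.py | one_hotter
-- ===== SOURCE A (Python) =====
-- def one_hotter (dictionary, text):
--     '''takes a dictionary of clusters and a text returns a one hot encoded vector
--     where each text is represented by a one hot of clusters.
--
--     '''
--     cluster_keys = sorted(dictionary.keys())
--     one_hot = [0]*len(cluster_keys)
--
--     for word in text.split():
--         for k, v in dictionary.items():
--             if word in v:
--                 i = cluster_keys.index(k)
--                 one_hot[i]+=1
--     return one_hot
-- ===== SOURCE B (Python) =====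
-- def one_hotter(dictionary, text):
--     # count each word of the text once, then score every cluster in one pass
--     counts = {}
--     for w in text.split():
--         counts[w] = counts.get(w, 0) + 1
--     return [sum(counts.get(w, 0) for w in dict.fromkeys(dictionary[k]))
--             for k in sorted(dictionary)]
-- ===== Notes on version B (the rewrite author's own statement) =====
-- stated objective: alternative
-- what changed: Replaces the per-word scan over all clusters with repeated list.index by a single word-count dictionary built in one pass over the text, then one pass over the sorted clusters summing the counts of each cluster's distinct words.
import Mathlib
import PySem

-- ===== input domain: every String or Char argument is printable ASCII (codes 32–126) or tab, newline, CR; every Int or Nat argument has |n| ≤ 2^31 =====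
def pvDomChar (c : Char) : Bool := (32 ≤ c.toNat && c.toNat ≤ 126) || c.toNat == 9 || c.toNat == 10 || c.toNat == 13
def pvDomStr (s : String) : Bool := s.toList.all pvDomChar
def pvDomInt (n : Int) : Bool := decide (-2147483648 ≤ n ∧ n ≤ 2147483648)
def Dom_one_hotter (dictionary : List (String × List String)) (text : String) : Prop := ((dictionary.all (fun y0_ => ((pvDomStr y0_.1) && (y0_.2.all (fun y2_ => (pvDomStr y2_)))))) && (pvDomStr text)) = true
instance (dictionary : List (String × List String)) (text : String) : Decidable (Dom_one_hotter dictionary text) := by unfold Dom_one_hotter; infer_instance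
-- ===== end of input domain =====

-- B replaces A's per-word scan over all clusters (with repeated list.index) by one word-count
-- dictionary over the text and one pass over the sorted clusters (objective: alternative).


-- ===== PORT A =====
def one_hotter (dictionary : List (String × List String)) (text : String) : List Int :=
  let dd := PySem.Dict.ofList dictionary
  let cluster_keys := PySem.List.sorted dd.keys (fun x => x) false
  let one_hot := List.replicate cluster_keys.length (0 : Int)
  (PySem.Str.split₀ text).foldl
    (fun oh word =>
      dd.items.foldl
        (fun oh kv =>
          if word ∈ kv.2 then
            -- cluster_keys.index(k): k is a dict key, hence always found; the none branch (ValueError) is unreachable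
            match PySem.List.index? cluster_keys kv.1 with
            | some i => oh.set i (oh.getD i 0 + 1)
            | none => oh
          else oh)
        oh)
    one_hot

-- ===== PORT B =====
def one_hotter_alt (dictionary : List (String × List String)) (text : String) : List Int :=
  let dd := PySem.Dict.ofList dictionary
  let counts := (PySem.Str.split₀ text).foldl
    (fun c w => c.insert w (c.getD w 0 + 1)) (PySem.Dict.empty : PySem.Dict String Int)
  (PySem.List.sorted dd.keys (fun x => x) false).map
    -- dictionary[k]: k is one of the keys, so KeyError is unreachable and getD with default [] is exact here
    (fun k => ((PySem.List.dedup (dd.getD k [])).map (fun w => counts.getD w 0)).sum)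

-- ===== PRECONDITION & SPEC =====
def Spec_one_hotter (dictionary : List (String × List String)) (text : String) (out : List Int) : Prop := out = one_hotter_alt dictionary text
instance (dictionary : List (String × List String)) (text : String) (out : List Int) : Decidable (Spec_one_hotter dictionary text out) := by unfold Spec_one_hotter; infer_instance

-- ===== CLAIM (what is proved, stated in full; the proofs are below) =====
def Claim_equal_one_hotter : Prop := ∀ (dictionary : List (String × List String)) (text : String), Dom_one_hotter dictionary text → Spec_one_hotter dictionary text (one_hotter dictionary text)

-- ===== LEMMAS AND PROOFS =====

-- index? on a Nodup list points exactly at the unique occurrence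
theorem index?_eq_some_iff_getElem (ck : List String) (hnd : ck.Nodup) (x : String)
    (hx : x ∈ ck) (j : Nat) (hj : j < ck.length) :
    PySem.List.index? ck x = some j ↔ x = ck[j] := by
  constructor
  · intro h
    obtain ⟨hk, he, -⟩ := PySem.List.getElem_of_index?_eq_some h
    exact he.symm
  · intro h
    have hs := PySem.List.index?_isSome_iff (xs := ck) (v := x) |>.mpr hx
    obtain ⟨j', hj'⟩ := Option.isSome_iff_exists.mp hs
    obtain ⟨hk', he', -⟩ := PySem.List.getElem_of_index?_eq_some hj'
    have : j' = j := by
      apply hnd.getElem_inj_iff.mp (by rw [he', ← h])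
    rw [hj', this]

-- counting over an association list with distinct keys: only the unique entry at key k can match
theorem countP_unique_key (l : List (String × List String)) (hnd : (l.map Prod.fst).Nodup)
    (k : String) (v : List String) (hmem : (k, v) ∈ l) (p : List String → Bool) :
    l.countP (fun kv => p kv.2 && (kv.1 == k)) = if p v then 1 else 0 := by
  induction l with
  | nil => simp at hmem
  | cons kv rest ih =>
    simp only [List.map_cons, List.nodup_cons] at hnd
    rcases List.mem_cons.mp hmem with heq | hmemr
    · subst heq
      have hz : rest.countP (fun kv => p kv.2 && (kv.1 == k)) = 0 := by
        apply List.countP_eq_zero.mpr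
        intro x hx
        have : x.1 ≠ k := by
          intro he
          have hm := List.mem_map_of_mem (f := Prod.fst) hx
          rw [he] at hm
          exact hnd.1 hm
        simp [this]
      rw [List.countP_cons, hz]
      simp
    · have hk : kv.1 ≠ k := by
        intro he
        have hm := List.mem_map_of_mem (f := Prod.fst) hmemr
        rw [← he] at hm
        exact hnd.1 hm
      rw [List.countP_cons, ih hnd.2 hmemr]
      simp [hk]

-- membership count of each text word in a cluster = sum of text counts of the cluster's distinct words
theorem sum_count (ws v : List String) :
    (ws.map (fun w => if w ∈ v then (1:Int) else 0)).sum
      = ((PySem.List.dedup v).map (fun u => ((ws.count u : Nat) : Int))).sum := by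
  induction ws with
  | nil =>
    symm
    apply List.sum_eq_zero
    simp
  | cons w ws ih =>
    simp only [List.map_cons, List.sum_cons, List.count_cons]
    have hsplit : ((PySem.List.dedup v).map (fun u => ((ws.count u + if w == u then 1 else 0 : Nat) : Int))).sum
        = ((PySem.List.dedup v).map (fun u => ((ws.count u : Nat) : Int))).sum
          + ((PySem.List.dedup v).map (fun u => if w == u then (1:Int) else 0)).sum := by
      rw [← PySem.List.sum_map_add_int]
      congr 1
      apply List.map_congr_left
      intro u hu
      by_cases h : w == u <;> simp [h]
    rw [hsplit, PySem.List.sum_map_ite_one_zero, ih]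
    have hcnt : ((PySem.List.dedup v).countP (fun u => w == u) : Int) = if w ∈ v then (1:Int) else 0 := by
      have : (PySem.List.dedup v).countP (fun u => w == u) = (PySem.List.dedup v).count w := by
        apply List.countP_congr
        intro a _
        simp [BEq.comm]
      rw [this]
      by_cases hm : w ∈ v
      · rw [List.count_eq_one_of_mem (PySem.List.nodup_dedup v) ((PySem.List.mem_dedup v w).mpr hm)]
        simp [hm]
      · rw [List.count_eq_zero_of_not_mem (fun hc => hm ((PySem.List.mem_dedup v w).mp hc))]
        simp [hm]
    rw [hcnt]
    ring

-- A's inner loop (over dict items, one word) preserves the vector length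
theorem inner_len (ck : List String) (word : String) (items : List (String × List String)) (oh : List Int) :
    (items.foldl (fun oh kv =>
      if word ∈ kv.2 then
        match PySem.List.index? ck kv.1 with
        | some i => oh.set i (oh.getD i 0 + 1)
        | none => oh
      else oh) oh).length = oh.length := by
  induction items generalizing oh with
  | nil => rfl
  | cons kv rest ih =>
    simp only [List.foldl_cons]
    rw [ih]
    split_ifs with h
    · cases hidx : PySem.List.index? ck kv.1 <;> simp
    · rfl

-- entrywise effect of A's inner loop: it adds the number of matching items whose key sits at position j
theorem inner_getD (ck : List String) (word : String) (items : List (String × List String))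
    (oh : List Int) (j : Nat) (hj : j < oh.length) :
    (items.foldl (fun oh kv =>
      if word ∈ kv.2 then
        match PySem.List.index? ck kv.1 with
        | some i => oh.set i (oh.getD i 0 + 1)
        | none => oh
      else oh) oh).getD j 0
    = oh.getD j 0 + ((items.countP (fun kv =>
        decide (word ∈ kv.2) && (PySem.List.index? ck kv.1 == some j))) : Int) := by
  induction items generalizing oh with
  | nil => simp
  | cons kv rest ih =>
    simp only [List.foldl_cons, List.countP_cons]
    by_cases hw : word ∈ kv.2
    · simp only [hw, if_pos, decide_true, Bool.true_and]
      cases hidx : PySem.List.index? ck kv.1 with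
      | none =>
        rw [ih oh hj]
        simp
      | some i =>
        have hlen : (oh.set i (oh.getD i 0 + 1)).length = oh.length := by simp
        rw [ih _ (by rw [hlen]; exact hj)]
        by_cases hij : i = j
        · subst hij
          have hset : (oh.set i (oh.getD i 0 + 1)).getD i 0 = oh.getD i 0 + 1 := by
            simp [List.getD_eq_getElem?_getD, hj]
          rw [hset]
          simp
          ring
        · have hset : (oh.set i (oh.getD i 0 + 1)).getD j 0 = oh.getD j 0 := by
            simp [List.getD_eq_getElem?_getD, hij]
          rw [hset]
          simp [hij]
    · simp only [hw, if_neg, decide_false, Bool.false_and, not_false_iff]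
      rw [ih oh hj]
      simp

-- length through A's whole double loop
theorem outer_len (ck : List String) (items : List (String × List String))
    (ws : List String) (oh : List Int) :
    (ws.foldl (fun oh word => items.foldl (fun oh kv =>
      if word ∈ kv.2 then
        match PySem.List.index? ck kv.1 with
        | some i => oh.set i (oh.getD i 0 + 1)
        | none => oh
      else oh) oh) oh).length = oh.length := by
  induction ws generalizing oh with
  | nil => rfl
  | cons w ws ih =>
    simp only [List.foldl_cons]
    rw [ih, inner_len]

-- entrywise effect of A's whole double loop
theorem outer_getD (ck : List String) (items : List (String × List String))
    (ws : List String) (oh : List Int) (j : Nat) (hj : j < oh.length) :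
    (ws.foldl (fun oh word => items.foldl (fun oh kv =>
      if word ∈ kv.2 then
        match PySem.List.index? ck kv.1 with
        | some i => oh.set i (oh.getD i 0 + 1)
        | none => oh
      else oh) oh) oh).getD j 0
    = oh.getD j 0 + (ws.map (fun w => ((items.countP (fun kv =>
        decide (w ∈ kv.2) && (PySem.List.index? ck kv.1 == some j))) : Int))).sum := by
  induction ws generalizing oh with
  | nil => simp
  | cons w ws ih =>
    simp only [List.foldl_cons, List.map_cons, List.sum_cons]
    rw [ih _ (by rw [inner_len]; exact hj), inner_getD ck w items oh j hj]
    ring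

theorem one_hotter_eq (d : List (String × List String)) (t : String) :
    one_hotter d t = one_hotter_alt d t := by
  simp only [one_hotter, one_hotter_alt]
  set dd := PySem.Dict.ofList d with hdd
  set ck := PySem.List.sorted dd.keys (fun x => x) false with hck
  set ws := PySem.Str.split₀ t with hws
  have hperm : ck.Perm dd.keys := PySem.List.sorted_perm dd.keys (fun x => x) false
  have hnodupK : dd.keys.Nodup := PySem.Dict.nodup_keys_ofList d
  have hnodup : ck.Nodup := hperm.nodup_iff.mpr hnodupK
  apply List.ext_getElem
  · rw [outer_len]
    simp
  · intro j hj1 hj2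
    have hjck : j < ck.length := by
      rw [outer_len] at hj1
      simpa using hj1
    have hjr : j < (List.replicate ck.length (0:Int)).length := by simpa using hjck
    rw [List.getElem_map]
    rw [← List.getD_eq_getElem _ 0 hj1]
    rw [outer_getD ck dd.items ws _ j hjr]
    have h0 : (List.replicate ck.length (0:Int)).getD j 0 = 0 := by
      simp [List.getD_eq_getElem?_getD, hjck]
    rw [h0, zero_add]
    -- the key at position j and its cluster
    have hkmem : ck[j] ∈ ck := List.getElem_mem hjck
    have hkkeys : ck[j] ∈ dd.keys := hperm.mem_iff.mp hkmem
    have hc : dd.contains ck[j] = true := (PySem.Dict.contains_iff_mem_keys (d := dd) (k := ck[j])).mpr hkkeys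
    obtain ⟨v, hv⟩ : ∃ v, dd.get? ck[j] = some v := by
      have := PySem.Dict.contains_eq_isSome_get? (d := dd) (k := ck[j])
      rw [hc] at this
      exact Option.isSome_iff_exists.mp this.symm
    have hgetD : dd.getD ck[j] [] = v := PySem.Dict.getD_of_get?_eq_some dd [] hv
    have hitems : (ck[j], v) ∈ dd.items := PySem.Dict.mem_items_of_get?_eq_some dd hv
    have hndItems : (dd.items.map Prod.fst).Nodup := hnodupK
    -- rewrite each word's item count to a membership test of that one cluster
    have hcountP : ∀ w : String, dd.items.countP (fun kv =>
        decide (w ∈ kv.2) && (PySem.List.index? ck kv.1 == some j))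
        = if w ∈ v then 1 else 0 := by
      intro w
      have hpred : dd.items.countP (fun kv =>
          decide (w ∈ kv.2) && (PySem.List.index? ck kv.1 == some j))
          = dd.items.countP (fun kv => decide (w ∈ kv.2) && (kv.1 == ck[j])) := by
        apply List.countP_congr
        intro kv hkv
        have hmemck : kv.1 ∈ ck := by
          apply hperm.mem_iff.mpr
          exact PySem.Dict.mem_keys_of_mem_items dd hkv
        have hiff := index?_eq_some_iff_getElem ck hnodup kv.1 hmemck j hjck
        by_cases he : kv.1 = ck[j]
        · rw [hiff.mpr he, he]
          simp
        · have h1 : PySem.List.index? ck kv.1 ≠ some j := fun hcon => he (hiff.mp hcon)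
          rw [show (PySem.List.index? ck kv.1 == some j) = false from beq_eq_false_iff_ne.mpr h1,
             show (kv.1 == ck[j]) = false from beq_eq_false_iff_ne.mpr he]
      rw [hpred, countP_unique_key dd.items hndItems ck[j] v hitems (fun l => decide (w ∈ l))]
      simp
    have hmapc : (ws.map (fun w => ((dd.items.countP (fun kv =>
        decide (w ∈ kv.2) && (PySem.List.index? ck kv.1 == some j))) : Int))).sum
        = (ws.map (fun w => if w ∈ v then (1:Int) else 0)).sum := by
      congr 1
      apply List.map_congr_left
      intro w hw
      rw [hcountP w]
      split_ifs <;> simp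
    rw [hmapc, sum_count]
    -- B's side: the j-th map entry
    rw [hgetD]
    congr 1
    apply List.map_congr_left
    intro u hu
    rw [PySem.Dict.getD_foldl_insert_add_one, PySem.Dict.getD_empty]
    simp

-- ===== VERDICT (by name: the statement is the Claim_ definition above) =====
theorem one_hotter_spec : Claim_equal_one_hotter := by
  intro d t _
  unfold Spec_one_hotter
  exact one_hotter_eq d t
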